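-- pv_equiv track=rewrite | github.com/SiddAjriY2Jaccount/algorithms-cs5800 | dp/billboards/billboards.py | find_buddies
-- ===== SOURCE A (Python) =====
-- def find_buddies(x, D):
--     buddy = [-1 for i in range(len(x))]
--     right = len(x) - 1
--     left = len(x) - 1
--     while (right >= 0):
--         if (left < 0):
--             buddy[right] = -1
--             right -= 1
--             left = right
--         elif (x[right] - x[left]) >= D:
--             buddy[right] = left
--             right -= 1
--             left = right
--         else:
--             left -= 1
--
--     return buddy
-- ===== SOURCE B (Python) =====
-- def _bleft(vals, t):
--     # first index whose value is >= t (vals non-decreasing)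
--     lo, hi = 0, len(vals)
--     while lo < hi:
--         mid = (lo + hi) // 2
--         if vals[mid] < t:
--             lo = mid + 1
--         else:
--             hi = mid
--     return lo
--
--
-- def _bright(vals, t):
--     # first index whose value is > t (vals non-decreasing)
--     lo, hi = 0, len(vals)
--     while lo < hi:
--         mid = (lo + hi) // 2
--         if vals[mid] <= t:
--             lo = mid + 1
--         else:
--             hi = mid
--     return lo
--
--
-- def find_buddies(x, D):
--     n = len(x)
--     buddy = [-1 for _ in range(n)]
--     stack = []  # candidate indices, x-values strictly increasing bottom-to-top
--     vals = []   # vals[p] == x[stack[p]]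
--     for i in range(n):
--         xi = x[i]
--         cut = _bleft(vals, xi)   # stacked values >= xi are superseded by i
--         del stack[cut:]
--         del vals[cut:]
--         stack.append(i)
--         vals.append(xi)
--         k = _bright(vals, xi - D)  # number of stacked values <= xi - D
--         buddy[i] = stack[k - 1] if k else -1
--     return buddy
-- ===== Notes on version B (the rewrite author's own statement) =====
-- stated objective: faster
-- what changed: Replaced the per-index backward rescan with a single left-to-right pass that maintains a monotonic stack of suffix-minimum candidate indices (strictly increasing values) and answers each index by hand-written binary search on the stacked values.
import Mathlib
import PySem

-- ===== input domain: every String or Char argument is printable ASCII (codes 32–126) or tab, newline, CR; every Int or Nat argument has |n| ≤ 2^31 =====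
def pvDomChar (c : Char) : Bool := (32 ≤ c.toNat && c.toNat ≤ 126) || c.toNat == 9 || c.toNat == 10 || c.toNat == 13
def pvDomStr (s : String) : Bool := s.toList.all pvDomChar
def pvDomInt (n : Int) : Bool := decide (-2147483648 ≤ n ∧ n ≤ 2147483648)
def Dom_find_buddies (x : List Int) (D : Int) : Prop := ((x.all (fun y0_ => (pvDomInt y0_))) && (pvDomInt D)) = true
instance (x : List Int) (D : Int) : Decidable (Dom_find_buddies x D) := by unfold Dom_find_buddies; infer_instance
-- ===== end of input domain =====

-- B replaces A's per-index backward rescan with one left-to-right pass over a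
-- monotonic stack of candidate indices plus hand-written binary search on the
-- stacked values (objective: faster in the worst case).


-- ===== PORT A =====
-- A's while loop: state (buddy, right, left); x[right], x[left] are always in
-- range when read (0 ≤ left ≤ right < len x), so pyGetD/pySetD are exact here.
def loopA (x : List Int) (D : Int) (buddy : List Int) (right left : Int) : List Int :=
  if 0 ≤ right then
    if left < 0 then
      loopA x D (PySem.List.pySetD buddy right (-1)) (right - 1) (right - 1)
    else if D ≤ PySem.List.pyGetD x right 0 - PySem.List.pyGetD x left 0 then
      loopA x D (PySem.List.pySetD buddy right left) (right - 1) (right - 1)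
    else
      loopA x D buddy right (left - 1)
  else buddy
termination_by ((right + 1).toNat, (left + 1).toNat)
decreasing_by
  · exact Prod.Lex.left _ _ (by omega)
  · exact Prod.Lex.left _ _ (by omega)
  · exact Prod.Lex.right _ (by omega)

def find_buddies (x : List Int) (D : Int) : List Int :=
  loopA x D ((List.range x.length).map (fun _ => (-1 : Int)))
    ((x.length : Int) - 1) ((x.length : Int) - 1)

-- ===== PORT B =====
-- _bleft's while loop; lo, hi stay within 0..len vals, so Nat with Nat division
-- computes exactly Python's nonnegative ints and '//'; vals[mid] is in range.
def bleftLoop (vals : List Int) (t : Int) (lo hi : Nat) : Nat :=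
  if lo < hi then
    let mid := (lo + hi) / 2
    if vals.getD mid 0 < t then bleftLoop vals t (mid + 1) hi
    else bleftLoop vals t lo mid
  else lo
termination_by hi - lo
decreasing_by all_goals omega

def bleft (vals : List Int) (t : Int) : Nat := bleftLoop vals t 0 vals.length

-- _bright's while loop (same shape, '≤' instead of '<')
def brightLoop (vals : List Int) (t : Int) (lo hi : Nat) : Nat :=
  if lo < hi then
    let mid := (lo + hi) / 2
    if vals.getD mid 0 ≤ t then brightLoop vals t (mid + 1) hi
    else brightLoop vals t lo mid
  else lo
termination_by hi - lo
decreasing_by all_goals omega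

def bright (vals : List Int) (t : Int) : Nat := brightLoop vals t 0 vals.length

-- loop body of B's 'for i in range(n)'; i is a nonnegative index, so List.range
-- and Nat-indexed reads are exact; 'del stack[cut:]' is List.take cut;
-- stack[k-1] with k ≥ 1 is in range, so getD is exact.
def stepB (x : List Int) (D : Int)
    (st : List Int × List Nat × List Int) (i : Nat) : List Int × List Nat × List Int :=
  let (buddy, stack, vals) := st
  let xi := x.getD i 0
  let cut := bleft vals xi
  let stack1 := stack.take cut ++ [i]
  let vals1 := vals.take cut ++ [xi]
  let k := bright vals1 (xi - D)
  let buddy1 := buddy.set i (if k = 0 then (-1 : Int) else ((stack1.getD (k - 1) 0 : Nat) : Int))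
  (buddy1, stack1, vals1)

def find_buddies_alt (x : List Int) (D : Int) : List Int :=
  ((List.range x.length).foldl (stepB x D)
    ((List.range x.length).map (fun _ => (-1 : Int)), ([] : List Nat), ([] : List Int))).1

-- ===== PRECONDITION & SPEC =====
def Spec_find_buddies (x : List Int) (D : Int) (out : List Int) : Prop := out = find_buddies_alt x D
instance (x : List Int) (D : Int) (out : List Int) : Decidable (Spec_find_buddies x D out) := by unfold Spec_find_buddies; infer_instance

-- ===== CLAIM (what is proved, stated in full; the proofs are below) =====
def Claim_equal_find_buddies : Prop := ∀ (x : List Int) (D : Int), Dom_find_buddies x D → Spec_find_buddies x D (find_buddies x D)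

-- ===== LEMMAS AND PROOFS =====

-- the common specification: buddy[i] = largest j ≤ i with x[j] ≤ x[i] - D, else -1
def cand (x : List Int) (D : Int) (i : Nat) : List Nat :=
  (List.range (i + 1)).filter (fun j => decide (x.getD j 0 ≤ x.getD i 0 - D))

def specv (x : List Int) (D : Int) (i : Nat) : Int :=
  (cand x D i).foldl (fun (a : Int) (j : Nat) => max a (j : Int)) (-1)

lemma mem_cand {x : List Int} {D : Int} {i j : Nat} :
    j ∈ cand x D i ↔ j ≤ i ∧ x.getD j 0 ≤ x.getD i 0 - D := by
  simp only [cand, List.mem_filter, List.mem_range, Nat.lt_succ_iff, decide_eq_true_eq]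

lemma foldl_max_le {l : List Nat} {a m : Int} (ha : a ≤ m) (h : ∀ j ∈ l, (j : Int) ≤ m) :
    l.foldl (fun (a : Int) (j : Nat) => max a (j : Int)) a ≤ m := by
  induction l generalizing a with
  | nil => exact ha
  | cons b bs ih =>
      exact ih (by simp [ha, h b (by simp)]) (fun j hj => h j (by simp [hj]))

lemma specv_eq_of_max {x : List Int} {D : Int} {i m : Nat}
    (hm : m ∈ cand x D i) (hmax : ∀ j ∈ cand x D i, j ≤ m) :
    specv x D i = (m : Int) := by
  unfold specv
  have h1 : (m : Int) ≤ (cand x D i).foldl (fun (a : Int) (j : Nat) => max a (j : Int)) (-1) :=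
    (PySem.List.le_foldl_max_int (cand x D i) (fun j => (j : Int)) (-1)).2 m hm
  have h2 : (cand x D i).foldl (fun (a : Int) (j : Nat) => max a (j : Int)) (-1) ≤ (m : Int) :=
    by
      apply foldl_max_le (by omega)
      intro j hj
      exact_mod_cast Nat.cast_le.mpr (hmax j hj)
  exact le_antisymm h2 h1

lemma specv_eq_neg_one {x : List Int} {D : Int} {i : Nat}
    (h : ∀ j ≤ i, ¬ (x.getD j 0 ≤ x.getD i 0 - D)) :
    specv x D i = -1 := by
  have : cand x D i = [] := by
    apply List.filter_eq_nil_iff.2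
    intro j hj
    simp only [List.mem_range, Nat.lt_succ_iff] at hj
    simpa using h j hj
  simp [specv, this]

-- ---------- A-side ----------

lemma loopA_length (x : List Int) (D : Int) :
    ∀ buddy (right left : Int), (loopA x D buddy right left).length = buddy.length := by
  intro buddy right left
  induction buddy, right, left using loopA.induct x D with
  | case1 buddy right left h1 h2 ih =>
      rw [loopA, if_pos h1, if_pos h2]
      simp [ih, PySem.List.length_pySetD]
  | case2 buddy right left h1 h2 h3 ih =>
      rw [loopA, if_pos h1, if_neg h2, if_pos h3]
      simp [ih, PySem.List.length_pySetD]
  | case3 buddy right left h1 h2 h3 ih =>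
      rw [loopA, if_pos h1, if_neg h2, if_neg h3]
      exact ih
  | case4 buddy right left h1 =>
      rw [loopA, if_neg h1]

lemma loopA_eq (x : List Int) (D : Int) :
    ∀ (buddy : List Int) (right left : Int),
      buddy.length = x.length →
      right < (x.length : Int) →
      left ≤ right →
      (∀ j : Nat, left < (j : Int) → (j : Int) ≤ right →
        ¬ (x.getD j 0 ≤ x.getD right.toNat 0 - D)) →
      (∀ k : Nat, right < (k : Int) → k < x.length → buddy.getD k 0 = specv x D k) →
      ∀ k : Nat, k < x.length → (loopA x D buddy right left).getD k 0 = specv x D k := by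
  intro buddy right left
  induction buddy, right, left using loopA.induct x D with
  | case1 buddy right left h1 h2 ih =>
      intro hlen hr hlr hno hsp k hk
      obtain ⟨r, rfl⟩ : ∃ r : Nat, right = (r : Int) := ⟨right.toNat, (Int.toNat_of_nonneg h1).symm⟩
      rw [loopA, if_pos h1, if_pos h2]
      apply ih
      · simp [hlen]
      · omega
      · omega
      · intro j hj1 hj2; omega
      · intro k hk1 hk2
        rw [PySem.List.pySetD_natCast]
        by_cases hkr : k = r
        · subst hkr
          have hs : specv x D k = -1 :=
            specv_eq_neg_one (fun j hj => by simpa using hno j (by omega) (by omega))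
          simp [List.getD_eq_getElem?_getD, hlen, hk2, hs]
        · rw [List.getD_eq_getElem?_getD, List.getElem?_set_ne (by omega),
              ← List.getD_eq_getElem?_getD]
          exact hsp k (by omega) hk2
      · exact hk
  | case2 buddy right left h1 h2 h3 ih =>
      intro hlen hr hlr hno hsp k hk
      obtain ⟨r, rfl⟩ : ∃ r : Nat, right = (r : Int) := ⟨right.toNat, (Int.toNat_of_nonneg h1).symm⟩
      obtain ⟨lf, rfl⟩ : ∃ lf : Nat, left = (lf : Int) := ⟨left.toNat, (Int.toNat_of_nonneg (by omega)).symm⟩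
      rw [loopA, if_pos h1, if_neg h2, if_pos h3]
      apply ih
      · simp [hlen]
      · omega
      · omega
      · intro j hj1 hj2; omega
      · intro k hk1 hk2
        rw [PySem.List.pySetD_natCast]
        by_cases hkr : k = r
        · subst hkr
          have hs : specv x D k = (lf : Int) := by
            apply specv_eq_of_max (m := lf)
            · rw [mem_cand]
              refine ⟨by omega, ?_⟩
              simp only [PySem.List.pyGetD_natCast, List.getD_eq_getElem?_getD] at h3
              simp only [List.getD_eq_getElem?_getD]
              omega
            · intro j hj
              rw [mem_cand] at hj
              by_contra hgt
              exact hno j (by omega) (by omega) (by simpa using hj.2)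
          simp [List.getD_eq_getElem?_getD, hlen, hk2, hs]
        · rw [List.getD_eq_getElem?_getD, List.getElem?_set_ne (by omega),
              ← List.getD_eq_getElem?_getD]
          exact hsp k (by omega) hk2
      · exact hk
  | case3 buddy right left h1 h2 h3 ih =>
      intro hlen hr hlr hno hsp k hk
      obtain ⟨r, rfl⟩ : ∃ r : Nat, right = (r : Int) := ⟨right.toNat, (Int.toNat_of_nonneg h1).symm⟩
      obtain ⟨lf, rfl⟩ : ∃ lf : Nat, left = (lf : Int) := ⟨left.toNat, (Int.toNat_of_nonneg (by omega)).symm⟩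
      rw [loopA, if_pos h1, if_neg h2, if_neg h3]
      apply ih hlen hr (by omega)
      · intro j hj1 hj2
        by_cases hjl : j = lf
        · subst hjl
          simp only [PySem.List.pyGetD_natCast] at h3
          intro hc
          apply h3
          simp only [Int.toNat_natCast] at hc ⊢
          omega
        · exact hno j (by omega) hj2
      · exact hsp
      · exact hk
  | case4 buddy right left h1 =>
      intro hlen hr hlr hno hsp k hk
      rw [loopA, if_neg h1]
      exact hsp k (by omega) hk

-- ---------- B-side ----------

lemma bleftLoop_spec (vals : List Int) (t : Int)
    (hsort : ∀ p q, p ≤ q → q < vals.length → vals.getD p 0 ≤ vals.getD q 0) :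
    ∀ lo hi, lo ≤ hi → hi ≤ vals.length →
      (∀ k, k < lo → vals.getD k 0 < t) →
      (∀ k, hi ≤ k → k < vals.length → t ≤ vals.getD k 0) →
      (∀ k, k < bleftLoop vals t lo hi → vals.getD k 0 < t) ∧
      (∀ k, bleftLoop vals t lo hi ≤ k → k < vals.length → t ≤ vals.getD k 0) ∧
      bleftLoop vals t lo hi ≤ vals.length := by
  intro lo hi
  induction lo, hi using bleftLoop.induct vals t with
  | case1 lo hi hlt mid hcond ih =>
      intro hle hlen hlow hhigh
      have hmid : mid = (lo + hi) / 2 := rfl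
      rw [bleftLoop, if_pos hlt]
      simp only []
      rw [if_pos hcond]
      exact ih (by omega) hlen
        (fun k hk => lt_of_le_of_lt (hsort k mid (by omega) (by omega)) hcond)
        hhigh
  | case2 lo hi hlt mid hcond ih =>
      intro hle hlen hlow hhigh
      have hmid : mid = (lo + hi) / 2 := rfl
      rw [bleftLoop, if_pos hlt]
      simp only []
      rw [if_neg hcond]
      exact ih (by omega) (by omega) hlow
        (fun k hk hk2 => le_trans (le_of_not_gt hcond) (hsort mid k (by omega) hk2))
  | case3 lo hi hge =>
      intro hle hlen hlow hhigh
      rw [bleftLoop, if_neg hge]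
      exact ⟨hlow, fun k hk hk2 => hhigh k (by omega) hk2, by omega⟩

lemma brightLoop_spec (vals : List Int) (t : Int)
    (hsort : ∀ p q, p ≤ q → q < vals.length → vals.getD p 0 ≤ vals.getD q 0) :
    ∀ lo hi, lo ≤ hi → hi ≤ vals.length →
      (∀ k, k < lo → vals.getD k 0 ≤ t) →
      (∀ k, hi ≤ k → k < vals.length → t < vals.getD k 0) →
      (∀ k, k < brightLoop vals t lo hi → vals.getD k 0 ≤ t) ∧
      (∀ k, brightLoop vals t lo hi ≤ k → k < vals.length → t < vals.getD k 0) ∧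
      brightLoop vals t lo hi ≤ vals.length := by
  intro lo hi
  induction lo, hi using brightLoop.induct vals t with
  | case1 lo hi hlt mid hcond ih =>
      intro hle hlen hlow hhigh
      have hmid : mid = (lo + hi) / 2 := rfl
      rw [brightLoop, if_pos hlt]
      simp only []
      rw [if_pos hcond]
      exact ih (by omega) hlen
        (fun k hk => le_trans (hsort k mid (by omega) (by omega)) hcond)
        hhigh
  | case2 lo hi hlt mid hcond ih =>
      intro hle hlen hlow hhigh
      have hmid : mid = (lo + hi) / 2 := rfl
      rw [brightLoop, if_pos hlt]
      simp only []
      rw [if_neg hcond]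
      exact ih (by omega) (by omega) hlow
        (fun k hk hk2 => lt_of_lt_of_le (lt_of_not_ge hcond) (hsort mid k (by omega) hk2))
  | case3 lo hi hge =>
      intro hle hlen hlow hhigh
      rw [brightLoop, if_neg hge]
      exact ⟨hlow, fun k hk hk2 => hhigh k (by omega) hk2, by omega⟩

-- live x i j: j survives on the stack after the first i elements were processed
def live (x : List Int) (i j : Nat) : Bool :=
  decide (∀ j' < i, j < j' → x.getD j 0 < x.getD j' 0)

def stackI (x : List Int) (i : Nat) : List Nat := (List.range i).filter (live x i)

lemma take_eq_filter {α : Type} (P : α → Bool) :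
    ∀ (l : List α) (q : Nat), q ≤ l.length →
      (∀ k, k < q → ∀ (h : k < l.length), P (l.get ⟨k, h⟩) = true) →
      (∀ k, (h : k < l.length) → q ≤ k → P (l.get ⟨k, h⟩) = false) →
      l.take q = l.filter P := by
  intro l
  induction l with
  | nil => intro q _ _ _; simp
  | cons a tl ih =>
      intro q hq hlow hhigh
      cases q with
      | zero =>
          have h0 : List.filter P (a :: tl) = [] := by
            apply List.filter_eq_nil_iff.2
            intro b hb
            obtain ⟨⟨k, hk⟩, rfl⟩ := List.mem_iff_get.1 hb
            have hf := hhigh k hk (by omega)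
            simp only [List.get_eq_getElem] at hf
            simp [hf]
          simp [h0]
      | succ q =>
          have ha : P a = true := hlow 0 (by omega) (by simp)
          simp only [List.take_succ_cons, List.filter_cons, ha, if_pos]
          rw [ih q (by simpa using hq)
            (fun k hk h => hlow (k+1) (by omega) (by simpa using Nat.succ_lt_succ h))
            (fun k h hk => hhigh (k+1) (by simpa using Nat.succ_lt_succ h) (by omega))]

lemma mem_stackI {x : List Int} {i j : Nat} :
    j ∈ stackI x i ↔ j < i ∧ ∀ j' < i, j < j' → x.getD j 0 < x.getD j' 0 := by
  simp only [stackI, List.mem_filter, List.mem_range, live, decide_eq_true_eq]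

lemma stackI_pairwise (x : List Int) (i : Nat) : (stackI x i).Pairwise (· < ·) :=
  List.Pairwise.sublist List.filter_sublist List.pairwise_lt_range

lemma stackI_succ (x : List Int) (i : Nat) :
    stackI x (i + 1)
      = (stackI x i).filter (fun j => decide (x.getD j 0 < x.getD i 0)) ++ [i] := by
  unfold stackI
  rw [List.range_succ, List.filter_append, List.filter_filter]
  congr 1
  · apply List.filter_congr
    intro j hj
    simp only [List.mem_range] at hj
    simp only [live]
    rw [Bool.eq_iff_iff]
    simp only [Bool.and_eq_true, decide_eq_true_eq]
    constructor
    · intro h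
      exact ⟨h i (by omega) hj, fun j' hj' hjj' => h j' (by omega) hjj'⟩
    · rintro ⟨h2, h1⟩ j' hj' hjj'
      rcases Nat.lt_succ_iff_lt_or_eq.1 hj' with hcase | rfl
      · exact h1 j' hcase hjj'
      · exact h2
  · have h : live x (i + 1) i = true := by
      simp only [live, decide_eq_true_eq]
      intro j' h1 h2
      omega
    simp [h]

lemma cand_reach (x : List Int) (D : Int) (i : Nat) :
    ∀ j ∈ cand x D i, ∃ j' ∈ stackI x (i + 1), j ≤ j' ∧ x.getD j' 0 ≤ x.getD i 0 - D := by
  intro j hj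
  rw [mem_cand] at hj
  by_cases hl : ∀ j' < i + 1, j < j' → x.getD j 0 < x.getD j' 0
  · exact ⟨j, mem_stackI.2 ⟨by omega, hl⟩, le_refl j, hj.2⟩
  · have hl' : ∃ j'', j'' < i + 1 ∧ j < j'' ∧ x.getD j'' 0 ≤ x.getD j 0 := by
      by_contra hno
      apply hl
      intro j' h1 h2
      by_contra hv
      exact hno ⟨j', h1, h2, le_of_not_gt hv⟩
    obtain ⟨j'', hj''1, hj''2, hj''3⟩ := hl'
    have hj'' : j'' ∈ cand x D i := mem_cand.2 ⟨by omega, le_trans hj''3 hj.2⟩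
    obtain ⟨j', hm, hle, hv⟩ := cand_reach x D i j'' hj''
    exact ⟨j', hm, by omega, hv⟩
termination_by j _ => i - j
decreasing_by omega

lemma vals_getD (L : List Nat) (f : Nat → Int) (p : Nat) (hp : p < L.length) :
    (L.map f).getD p 0 = f (L.get ⟨p, hp⟩) := by
  simp [List.getD_eq_getElem?_getD, List.getElem?_map, List.getElem?_eq_getElem hp]

lemma stackI_get_lt (x : List Int) (i : Nat) {p q : Nat}
    (hp : p < (stackI x i).length) (hq : q < (stackI x i).length) (hpq : p < q) :
    (stackI x i).get ⟨p, hp⟩ < (stackI x i).get ⟨q, hq⟩ :=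
  List.pairwise_iff_get.1 (stackI_pairwise x i) ⟨p, hp⟩ ⟨q, hq⟩ hpq

lemma stackI_val_lt (x : List Int) (i : Nat) {p q : Nat}
    (hp : p < (stackI x i).length) (hq : q < (stackI x i).length) (hpq : p < q) :
    x.getD ((stackI x i).get ⟨p, hp⟩) 0 < x.getD ((stackI x i).get ⟨q, hq⟩) 0 := by
  have h1 := stackI_get_lt x i hp hq hpq
  have hmp := mem_stackI.1 (List.get_mem (stackI x i) ⟨p, hp⟩)
  have hmq := mem_stackI.1 (List.get_mem (stackI x i) ⟨q, hq⟩)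
  exact hmp.2 _ hmq.1 h1

lemma valsI_sorted (x : List Int) (i : Nat) :
    ∀ p q, p ≤ q → q < ((stackI x i).map (fun j => x.getD j 0)).length →
      ((stackI x i).map (fun j => x.getD j 0)).getD p 0
        ≤ ((stackI x i).map (fun j => x.getD j 0)).getD q 0 := by
  intro p q hpq hq
  rw [List.length_map] at hq
  rcases Nat.lt_or_ge p q with h | h
  · rw [vals_getD _ _ p (by omega), vals_getD _ _ q hq]
    exact le_of_lt (stackI_val_lt x i (by omega) hq h)
  · have : p = q := by omega
    subst this
    rfl

lemma invariantB (x : List Int) (D : Int) :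
    ∀ i, i ≤ x.length →
      (List.range i).foldl (stepB x D)
          ((List.range x.length).map (fun _ => (-1 : Int)), ([] : List Nat), ([] : List Int))
        = ((List.range x.length).map (fun k => if k < i then specv x D k else -1),
           stackI x i,
           (stackI x i).map (fun j => x.getD j 0)) := by
  intro i
  induction i with
  | zero => simp [stackI]
  | succ i ih =>
      intro hin
      have hi : i < x.length := by omega
      rw [List.range_succ, List.foldl_append, ih (by omega), List.foldl_cons, List.foldl_nil]
      simp only [stepB]
      set L := stackI x i with hL
      set f : Nat → Int := fun j => x.getD j 0 with hf
      set xi := x.getD i 0 with hxi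
      set vals := L.map f with hvals
      -- the binary-search cut equals the filter below xi
      have hsort := valsI_sorted x i
      have hbdef : bleft vals xi = bleftLoop vals xi 0 vals.length := rfl
      obtain ⟨hcut1, hcut2, hcut3⟩ :=
        bleftLoop_spec vals xi hsort 0 vals.length (by omega) (le_refl _)
          (fun k hk => absurd hk (by omega)) (fun k hk hk2 => absurd (lt_of_le_of_lt hk hk2) (by omega))
      rw [← hbdef] at hcut1 hcut2 hcut3
      have htake : L.take (bleft vals xi) = L.filter (fun j => decide (x.getD j 0 < xi)) := by
        apply take_eq_filter _ L (bleft vals xi)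
          (by simpa [hvals] using hcut3)
        · intro k hk h
          have := hcut1 k hk
          rw [hvals, vals_getD L f k h] at this
          simpa using this
        · intro k h hk
          have := hcut2 k hk (by simpa [hvals] using h)
          rw [hvals, vals_getD L f k h] at this
          simpa using not_lt_of_ge this
      have hstack1 : L.take (bleft vals xi) ++ [i] = stackI x (i + 1) := by
        rw [htake, stackI_succ]
      have hvals1 : vals.take (bleft vals xi) ++ [xi]
          = (stackI x (i + 1)).map (fun j => x.getD j 0) := by
        rw [hvals, ← List.map_take, htake, stackI_succ]
        simp only [List.map_append, List.map_cons, List.map_nil]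
        rw [hL, hf, hxi]
      rw [hstack1, hvals1]
      -- the binary-search answer equals specv at i
      have hsort1 := valsI_sorted x (i + 1)
      set S1 := stackI x (i + 1) with hS1
      set vals1 := S1.map (fun j => x.getD j 0) with hvals1'
      obtain ⟨hb1, hb2, hb3⟩ :=
        brightLoop_spec vals1 (xi - D) hsort1 0 vals1.length (by omega) (le_refl _)
          (fun k hk => absurd hk (by omega)) (fun k hk hk2 => absurd (lt_of_le_of_lt hk hk2) (by omega))
      have hbrdef : bright vals1 (xi - D) = brightLoop vals1 (xi - D) 0 vals1.length := rfl
      rw [← hbrdef] at hb1 hb2 hb3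
      rw [hvals1', List.length_map] at hb3
      have hentry : (if bright vals1 (xi - D) = 0 then (-1 : Int)
          else ((S1.getD (bright vals1 (xi - D) - 1) 0 : Nat) : Int)) = specv x D i := by
        set k := bright vals1 (xi - D) with hk
        by_cases hk0 : k = 0
        · rw [if_pos hk0]
          symm
          apply specv_eq_neg_one
          intro j hj hcond
          have hjc : j ∈ cand x D i := mem_cand.2 ⟨hj, by simpa [hxi] using hcond⟩
          obtain ⟨j', hm, hle, hv⟩ := cand_reach x D i j hjc
          rw [← hS1] at hm
          obtain ⟨⟨p, hp⟩, rfl⟩ := List.mem_iff_get.1 hm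
          have hgt := hb2 p (by omega) (by simpa [hvals1'] using hp)
          rw [hvals1', vals_getD S1 _ p hp] at hgt
          simp only [hxi, List.getD_eq_getElem?_getD] at hgt hv hcond
          omega
        · rw [if_neg hk0]
          have hk1 : k - 1 < S1.length := by omega
          have hgetD : S1.getD (k - 1) 0 = S1.get ⟨k - 1, hk1⟩ := by
            simp [List.getD_eq_getElem?_getD, List.getElem?_eq_getElem hk1]
          set a := S1.get ⟨k - 1, hk1⟩ with ha
          rw [hgetD]
          symm
          apply specv_eq_of_max (m := a)
          · have hma := mem_stackI.1 (List.get_mem S1 ⟨k - 1, hk1⟩)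
            have hva := hb1 (k - 1) (by omega)
            rw [hvals1', vals_getD S1 _ (k - 1) hk1] at hva
            exact mem_cand.2 ⟨by omega, by simpa [hxi] using hva⟩
          · intro j hj
            obtain ⟨j', hm, hle, hv⟩ := cand_reach x D i j hj
            rw [← hS1] at hm
            obtain ⟨⟨p, hp⟩, rfl⟩ := List.mem_iff_get.1 hm
            have hpk : p < k := by
              by_contra hge
              have hgt := hb2 p (by omega) (by simpa [hvals1'] using hp)
              rw [hvals1', vals_getD S1 _ p hp] at hgt
              simp only [hxi, List.getD_eq_getElem?_getD] at hgt hv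
              omega
            have hpa : S1.get ⟨p, hp⟩ ≤ a := by
              rcases Nat.lt_or_ge p (k - 1) with hlt | hge
              · exact le_of_lt (stackI_get_lt x (i + 1) hp hk1 hlt)
              · have : p = k - 1 := by omega
                subst this
                rfl
            omega
      rw [hentry]
      -- the buddy array update
      have hbud : (List.map (fun k => if k < i then specv x D k else -1) (List.range x.length)).set i (specv x D i)
          = List.map (fun k => if k < i + 1 then specv x D k else -1) (List.range x.length) := by
        apply List.ext_getElem
        · simp
        · intro m hm1 hm2
          rw [List.getElem_set]
          simp only [List.getElem_map, List.getElem_range]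
          by_cases h1 : i = m
          · subst h1
            simp
          · by_cases h2 : m < i
            · rw [if_neg h1, if_pos h2, if_pos (by omega)]
            · rw [if_neg h1, if_neg h2, if_neg (by omega)]
      rw [hbud]

-- ===== VERDICT (by name: the statement is the Claim_ definition above) =====
theorem find_buddies_spec : Claim_equal_find_buddies := by
  intro x D _
  unfold Spec_find_buddies
  have hA : ∀ k, k < x.length → (find_buddies x D).getD k 0 = specv x D k := by
    intro k hk
    unfold find_buddies
    exact loopA_eq x D _ _ _ (by simp) (by omega) (le_refl _)
      (fun j hj1 hj2 => ((by omega : False).elim))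
      (fun k hk1 hk2 => ((by omega : False).elim)) k hk
  have hAlen : (find_buddies x D).length = x.length := by
    unfold find_buddies
    rw [loopA_length]
    simp
  have hB : find_buddies_alt x D
      = List.map (fun k => if k < x.length then specv x D k else -1) (List.range x.length) := by
    unfold find_buddies_alt
    rw [invariantB x D x.length (le_refl _)]
  rw [hB]
  apply List.ext_getElem
  · simp [hAlen]
  · intro m h1 h2
    simp only [List.getElem_map, List.getElem_range]
    have hm : m < x.length := by simpa using h2
    rw [if_pos hm, ← hA m hm, List.getD_eq_getElem _ _ (by omega)]
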